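-- pv_equiv track=rewrite | github.com/hsun0987/algorithm-study | 한민선/240703/2212. 센서/센서.py | solution
-- ===== SOURCE A (Python) =====
-- def solution(n, k, arr):
--     answer = 0
--
--     len = []
--     for i in range(n-1):
--        len.append(arr[i+1] - arr[i])
--
--     len.sort()
--
--     for _ in range(k-1):
--         len.pop()
--
--     answer = sum(len)
--     return answer
-- ===== SOURCE B (Python) =====
-- def solution(n, k, arr):
--     # selection instead of sort: running total, remove the max k-1 times
--     gaps = [arr[i+1] - arr[i] for i in range(n-1)]
--     total = sum(gaps)
--     for _ in range(k-1):
--         m = max(gaps)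
--         gaps.remove(m)
--         total -= m
--     return total
-- ===== Notes on version B (the rewrite author's own statement) =====
-- stated objective: alternative
-- what changed: B never sorts: it sums all gaps once and then performs k-1 selection steps (find max, remove it, subtract from the running total) instead of sorting the gap list and popping its tail.
import Mathlib
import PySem

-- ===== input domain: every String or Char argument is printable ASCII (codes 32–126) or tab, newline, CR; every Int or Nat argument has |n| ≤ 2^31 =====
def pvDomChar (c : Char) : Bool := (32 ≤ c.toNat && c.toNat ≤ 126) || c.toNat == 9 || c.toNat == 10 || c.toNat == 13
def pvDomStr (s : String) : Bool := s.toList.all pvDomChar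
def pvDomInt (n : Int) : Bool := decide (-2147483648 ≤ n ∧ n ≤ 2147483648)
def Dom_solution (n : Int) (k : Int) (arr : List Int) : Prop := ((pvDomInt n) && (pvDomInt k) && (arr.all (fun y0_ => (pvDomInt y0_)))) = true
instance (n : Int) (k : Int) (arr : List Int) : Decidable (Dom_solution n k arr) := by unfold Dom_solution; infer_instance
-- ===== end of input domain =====

-- B replaces A's sort-then-pop by one summing pass plus k-1 max-selection steps (objective: alternative).

-- ===== PORT A =====
-- literal port of A: build gap list by append, sort it, pop the last k-1 elements, sum
def solution (n : Int) (k : Int) (arr : List Int) : Int :=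
  let len0 : List Int := (PySem.List.pyRange 0 (n-1) 1).foldl
    (fun acc i => acc ++ [PySem.List.pyGetD arr (i+1) 0 - PySem.List.pyGetD arr i 0]) []
  let len1 := PySem.List.sorted len0 (fun x => x) false
  -- len.pop(): removes the last element; pop on an empty list raises IndexError (excluded by Pre_)
  let len2 := (PySem.List.pyRange 0 (k-1) 1).foldl (fun l _ => l.dropLast) len1
  len2.sum

-- ===== PORT B =====
-- B's loop body: m = max(gaps); gaps.remove(m); total -= m   (max([]) raises ValueError, excluded by Pre_)
def selLoop (j : Nat) (gaps : List Int) (total : Int) : Int :=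
  match j with
  | 0 => total
  | j+1 =>
    match PySem.List.max? gaps (fun x => x) with
    | none => total
    | some m => selLoop j ((PySem.List.remove? gaps m).getD gaps) (total - m)

def solution_alt (n : Int) (k : Int) (arr : List Int) : Int :=
  let gaps := (PySem.List.pyRange 0 (n-1) 1).map
    (fun i => PySem.List.pyGetD arr (i+1) 0 - PySem.List.pyGetD arr i 0)
  selLoop (k-1).toNat gaps gaps.sum

-- ===== PRECONDITION & SPEC =====
-- excluded are exactly the raising inputs: arr[n-1] out of range (IndexError) and more pops than gaps (pop/max on empty)
def Pre_solution (n : Int) (k : Int) (arr : List Int) : Prop :=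
  (2 ≤ n → n ≤ (arr.length : Int)) ∧ k - 1 ≤ max (n - 1) 0
instance (n : Int) (k : Int) (arr : List Int) : Decidable (Pre_solution n k arr) := by unfold Pre_solution; infer_instance
def pvWitness_solution : Int × Int × List Int := (3, 2, [1, 4, 9])
def Spec_solution (n : Int) (k : Int) (arr : List Int) (out : Int) : Prop := out = solution_alt n k arr
instance (n : Int) (k : Int) (arr : List Int) (out : Int) : Decidable (Spec_solution n k arr out) := by unfold Spec_solution; infer_instance

-- ===== CLAIM (what is proved, stated in full; the proofs are below) =====
def Claim_equal_solution : Prop := ∀ (n : Int) (k : Int) (arr : List Int), Dom_solution n k arr → Pre_solution n k arr → Spec_solution n k arr (solution n k arr)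

-- ===== LEMMAS AND PROOFS =====

-- A's append-fold builds the mapped list
theorem foldl_append_map (r : List Int) (f : Int → Int) (init : List Int) :
    r.foldl (fun acc i => acc ++ [f i]) init = init ++ r.map f := by
  induction r generalizing init with
  | nil => simp
  | cons x t ih => simp [List.foldl, ih]

-- popIter j s = s with its last j elements removed, pop by pop
def popIter (j : Nat) (s : List Int) : List Int :=
  match j with
  | 0 => s
  | j+1 => popIter j s.dropLast

theorem foldl_dropLast_eq_popIter (r : List Int) (s : List Int) :
    r.foldl (fun l _ => l.dropLast) s = popIter r.length s := by
  induction r generalizing s with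
  | nil => rfl
  | cons x t ih => simp [List.foldl, popIter, ih]

theorem mem_le_of_pairwise_append {ys : List Int} {a x : Int}
    (h : (ys ++ [a]).Pairwise (· ≤ ·)) (hx : x ∈ ys ++ [a]) : x ≤ a := by
  rcases List.mem_append.1 hx with h' | h'
  · exact (List.pairwise_append.1 h).2.2 x h' a (by simp)
  · simp at h'; omega

theorem le_getLast_of_sorted {s : List Int} (hs : s.Pairwise (· ≤ ·)) (hne : s ≠ [])
    {x : Int} (hx : x ∈ s) : x ≤ s.getLast hne := by
  have hsp := List.dropLast_append_getLast hne
  exact mem_le_of_pairwise_append (ys := s.dropLast) (a := s.getLast hne)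
    (by rw [hsp]; exact hs) (by rw [hsp]; exact hx)

theorem hs_drop {s : List Int} (hs : s.Pairwise (· ≤ ·)) : s.dropLast.Pairwise (· ≤ ·) :=
  hs.sublist (List.dropLast_sublist s)

-- key invariant: selection from any permutation l of a sorted s computes the popped-tail sum
theorem selLoop_eq (j : Nat) : ∀ (s l : List Int) (t : Int), l.Perm s →
    s.Pairwise (· ≤ ·) → j ≤ l.length →
    selLoop j l t = t - (l.sum - (popIter j s).sum) := by
  induction j with
  | zero => intro s l t hperm _ _; simp [selLoop, popIter, hperm.sum_eq]
  | succ j ih =>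
    intro s l t hperm hsort hj
    have hlne : l ≠ [] := by
      intro h; subst h; simp at hj
    obtain ⟨m, hm⟩ : ∃ m, PySem.List.max? l (fun x => x) = some m := by
      cases hmx : PySem.List.max? l (fun x => x) with
      | none => exact absurd ((PySem.List.max?_eq_none_iff l (fun x => x)).1 hmx) hlne
      | some m => exact ⟨m, rfl⟩
    have hmem : m ∈ l := PySem.List.max?_mem hm
    have hmax : ∀ y ∈ l, y ≤ m := fun y hy => PySem.List.max?_isMax hm y hy
    have hrm : (PySem.List.remove? l m).getD l = l.erase m := by
      rw [PySem.List.remove?_eq_some_erase l m hmem]; rfl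
    have hsne : s ≠ [] := by
      intro h; subst h; simp [List.Perm.eq_nil hperm] at hlne
    -- getLast s = m
    have hms : m ∈ s := hperm.mem_iff.1 hmem
    have hglm : s.getLast hsne = m := by
      have h1 : s.getLast hsne ≤ m := hmax _ (hperm.mem_iff.2 (List.getLast_mem hsne))
      have h2 : m ≤ s.getLast hsne := le_getLast_of_sorted hsort hsne hms
      omega
    have hssplit : s.dropLast ++ [m] = s := by
      rw [← hglm]; exact List.dropLast_append_getLast hsne
    -- l.erase m ~ s.dropLast
    have hperm' : (l.erase m).Perm s.dropLast := by
      have h1 : l.Perm (m :: l.erase m) := List.perm_cons_erase hmem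
      have h2 : s.Perm (m :: s.dropLast) := by
        conv_lhs => rw [← hssplit]
        exact List.Perm.trans (List.perm_append_comm) (by simp)
      exact (((h1.symm.trans hperm).trans h2)).cons_inv
    have hsort' : s.dropLast.Pairwise (· ≤ ·) := hs_drop hsort
    have hlen : j ≤ (l.erase m).length := by
      have := List.length_erase_of_mem hmem
      omega
    have hsum : (l.erase m).sum = l.sum - m := by
      have := (List.perm_cons_erase hmem).sum_eq
      simp at this; omega
    have hrec := ih s.dropLast (l.erase m) (t - m) hperm' hsort' hlen
    have hsum_s : s.sum = s.dropLast.sum + m := by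
      have : (s.dropLast ++ [m]).sum = s.sum := by rw [hssplit]
      simpa using this.symm
    rw [selLoop, hm]
    show selLoop j ((PySem.List.remove? l m).getD l) (t - m) = _
    rw [hrm, hrec, hsum, popIter]
    omega

-- ===== VERDICT (by name: the statement is the Claim_ definition above) =====
theorem solution_spec : Claim_equal_solution := by
  intro n k arr _ hpre
  unfold Spec_solution solution solution_alt
  set f : Int → Int := fun i => PySem.List.pyGetD arr (i+1) 0 - PySem.List.pyGetD arr i 0 with hf
  simp only [foldl_append_map, List.nil_append, foldl_dropLast_eq_popIter]
  set g := (PySem.List.pyRange 0 (n-1) 1).map f with hg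
  set s := PySem.List.sorted g (fun x => x) false with hs
  have hperm : g.Perm s := (PySem.List.sorted_perm g (fun x => x) false).symm
  have hsorted : s.Pairwise (· ≤ ·) := by
    have := PySem.List.sorted_pairwise (xs := g) (key := fun x => x)
    simpa using this
  have hglen : g.length = (n-1).toNat := by
    simp [hg, PySem.List.length_pyRange_one]
  have hrange_len : (PySem.List.pyRange 0 (k-1) 1).length = (k-1).toNat := by
    simp [PySem.List.length_pyRange_one]
  have hj : (k-1).toNat ≤ g.length := by
    rw [hglen]; rcases hpre with ⟨_, h2⟩; omega
  rw [hrange_len]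
  have := selLoop_eq (k-1).toNat s g g.sum hperm hsorted hj
  rw [this]
  have : g.sum = s.sum := hperm.sum_eq
  omega
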